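-- pv_equiv track=rewrite | github.com/YYYChang/Basic-Algorithms | 02_08_fsum_squ.py | sum_fibo
-- ===== SOURCE A (Python) =====
-- def sum_fibo(a) :
--     n = a % 30
--
--     if n <= 1 :
--         return n
--
--     Fn_1, Fn_2, Sum = 1, 0, 1
--
--     for i in range(n-1) :
--         Fn_1, Fn_2 = (Fn_1 + Fn_2) % 10, Fn_1 % 10
--         Sum = (Sum + Fn_1 * Fn_1) % 10
--
--     return Sum % 10
-- ===== SOURCE B (Python) =====
-- def sum_fibo(a):
--     # sum_{i=1}^{n} F_i^2 = F_n * F_{n+1}: one pair-update loop, no square accumulator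
--     n = a % 30
--     f, g = 0, 1
--     for _ in range(n):
--         f, g = g, (f + g) % 10
--     return (f * g) % 10
-- ===== Notes on version B (the rewrite author's own statement) =====
-- stated objective: simpler
-- what changed: Replaces A's three-variable loop accumulating squared Fibonacci terms by the identity sum F_i^2 = F_n*F_{n+1}: one pair-update Fibonacci loop and a final product mod 10.
import Mathlib
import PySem

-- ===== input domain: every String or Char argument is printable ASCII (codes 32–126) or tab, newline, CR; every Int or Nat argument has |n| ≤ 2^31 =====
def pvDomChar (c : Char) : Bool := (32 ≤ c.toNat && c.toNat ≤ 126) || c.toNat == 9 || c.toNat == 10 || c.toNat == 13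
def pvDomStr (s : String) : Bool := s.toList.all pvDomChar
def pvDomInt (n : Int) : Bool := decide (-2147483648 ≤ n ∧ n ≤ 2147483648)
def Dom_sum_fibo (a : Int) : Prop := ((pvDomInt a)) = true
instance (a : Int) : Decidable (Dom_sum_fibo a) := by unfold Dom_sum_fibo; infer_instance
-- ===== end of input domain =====

-- B replaces A's running sum of squared Fibonacci terms by the identity
-- sum_{i=1}^n F_i^2 = F_n * F_{n+1}, maintained by a single pair-update loop (objective: simpler).

-- ===== PORT A =====
def sum_fibo (a : Int) : Int :=
  let n := PySem.Int.mod a 30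
  if n ≤ 1 then n
  else
    let st := (PySem.List.pyRange 0 (n - 1) 1).foldl
      (fun (st : Int × Int × Int) _ =>
        let Fn_1 := PySem.Int.mod (st.1 + st.2.1) 10
        let Fn_2 := PySem.Int.mod st.1 10
        (Fn_1, Fn_2, PySem.Int.mod (st.2.2 + Fn_1 * Fn_1) 10))
      (1, 0, 1)
    PySem.Int.mod st.2.2 10

-- ===== PORT B =====
def sum_fibo_alt (a : Int) : Int :=
  let n := PySem.Int.mod a 30
  let p := (PySem.List.pyRange 0 n 1).foldl
    (fun (p : Int × Int) _ => (p.2, PySem.Int.mod (p.1 + p.2) 10)) (0, 1)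
  PySem.Int.mod (p.1 * p.2) 10

-- ===== PRECONDITION & SPEC =====
def Spec_sum_fibo (a : Int) (out : Int) : Prop := out = sum_fibo_alt a
instance (a : Int) (out : Int) : Decidable (Spec_sum_fibo a out) := by unfold Spec_sum_fibo; infer_instance

-- ===== CLAIM (what is proved, stated in full; the proofs are below) =====
def Claim_equal_sum_fibo : Prop := ∀ (a : Int), Dom_sum_fibo a → Spec_sum_fibo a (sum_fibo a)

-- ===== LEMMAS AND PROOFS =====

-- Both ports depend on a only through n = a % 30, which lies in [0, 30); check the 30 residues.
theorem sum_fibo_residues : ∀ n ∈ PySem.List.pyRange 0 30 1,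
    (if n ≤ 1 then n
     else
       let st := (PySem.List.pyRange 0 (n - 1) 1).foldl
         (fun (st : Int × Int × Int) _ =>
           let Fn_1 := PySem.Int.mod (st.1 + st.2.1) 10
           let Fn_2 := PySem.Int.mod st.1 10
           (Fn_1, Fn_2, PySem.Int.mod (st.2.2 + Fn_1 * Fn_1) 10))
         (1, 0, 1)
       PySem.Int.mod st.2.2 10) =
    (let p := (PySem.List.pyRange 0 n 1).foldl
        (fun (p : Int × Int) _ => (p.2, PySem.Int.mod (p.1 + p.2) 10)) (0, 1)
     PySem.Int.mod (p.1 * p.2) 10) := by decide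

-- ===== VERDICT (by name: the statement is the Claim_ definition above) =====
theorem sum_fibo_spec : Claim_equal_sum_fibo := by
  intro a _
  unfold Spec_sum_fibo sum_fibo sum_fibo_alt
  have h1 : 0 ≤ PySem.Int.mod a 30 := PySem.Int.mod_nonneg a (by norm_num)
  have h2 : PySem.Int.mod a 30 < 30 := PySem.Int.mod_lt a (by norm_num)
  have := sum_fibo_residues (PySem.Int.mod a 30)
    (by rw [PySem.List.mem_pyRange_one]; exact ⟨h1, h2⟩)
  simpa using this
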